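/- GENERATED by farm/worked/mk_tree_copies.py from farm/worked/vorbis_finish_frame.COMPOSITION/Proof.lean (a worked proof of the farm's unit `vorbis_finish_frame.COMPOSITION`,
   accepted by the verdict) — do not edit. -/
import Vorbis.Spec.Units.vorbis_finish_frame_COMPOSITION

/- THE COMPOSITION OF vorbis_finish_frame (in the farm's format): the five segment statements give the function's contract, by
   `ReachVia.trans` and, for each of the two FLATTENED loop nests, a nested induction on the lexicographic measure the head's assertion
   bounds: `(channels − i, n − j)` for the mixing loops (`AtMix.i_lt`, `AtMix.j_le`), `(channels − i, len − right − j)` for the saving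
   loops (`AtSave.i_lt`, `AtSave.j_le`). No machine code is walked. -/
open X86 X86.User Asan Vorbis Vorbis.Spec

namespace Vorbis.Spec.Worked.vorbis_finish_frame_COMPOSITION
open Vorbis.Spec.vorbis_finish_frame_COMPOSITION (Statement)

/-- From the exit of the saving loops the function returns: segment 5. -/
theorem finish_from_tail_w {Lay : Layout} {μ : Microarch} {u₀ : State}
    (hseg5 : vorbis_finish_frame.Seg5 Lay μ u₀)
    (others : List Obj) (frames : List (Nat × FrameLayout)) (len : Nat) (A : Arena) (stored room : Int) (ysz : Nat → Nat)
    (u : State) (ret : Word) (f : Nat) (v : State)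
    (hv : vorbis_finish_frame.AtTail Lay others frames len A stored room ysz u₀ u ret f v) :
    ReachVia Lay μ WayInv v
      (Returned (conv u₀) (vorbis_finish_frame.spec others frames len A stored room ysz) u ret) :=
  hseg5 others frames len A stored room ysz u ret f v hv

/-- From the head of the flattened saving loop at `(i, j)` the function returns: outer induction on `a ≥ channels − i`, inner
induction on `b ≥ len − right − j`. The step `(i, j) → (i, j + 1)` decreases `b` because the new assertion says
`right + (j + 1) ≤ len`; the step `(i, j) → (i + 1, 0)` decreases `a` because the new assertion says `i + 1 < channels`. -/
theorem finish_from_save_w {Lay : Layout} {μ : Microarch} {u₀ : State}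
    (hseg4 : vorbis_finish_frame.Seg4 Lay μ u₀) (hseg5 : vorbis_finish_frame.Seg5 Lay μ u₀)
    (others : List Obj) (frames : List (Nat × FrameLayout)) (len : Nat) (A : Arena) (stored room : Int) (ysz : Nat → Nat)
    (u : State) (ret : Word) (f : Nat) :
    ∀ (a i : Nat), (stb_vorbis.channels u.mem f).toNat - i ≤ a →
    ∀ (b j : Nat) (v : State), (s32 (u.reg .rsi) - s32 (u.reg .rcx) - (j : Int)).toNat ≤ b →
      vorbis_finish_frame.AtSave Lay others frames len A stored room ysz u₀ u ret f i j v →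
      ReachVia Lay μ WayInv v
        (Returned (conv u₀) (vorbis_finish_frame.spec others frames len A stored room ysz) u ret) := by
  intro a
  induction a with
  | zero =>
    intro i ha b j v _ hv
    have hlt := hv.i_lt
    omega
  | succ a iha =>
    intro i ha b
    induction b with
    | zero =>
      intro j v hb hv
      apply (hseg4 others frames len A stored room ysz u ret f i j v hv).trans
      intro w hw
      rcases hw with hnext | hnew | htail
      · have hj := hnext.j_le
        omega
      · have hlt := hnew.i_lt
        exact iha (i + 1) (by omega) _ 0 w (Nat.le_refl _) hnew
      · exact finish_from_tail_w hseg5 others frames len A stored room ysz u ret f w htail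
    | succ b ihb =>
      intro j v hb hv
      apply (hseg4 others frames len A stored room ysz u ret f i j v hv).trans
      intro w hw
      rcases hw with hnext | hnew | htail
      · have hj := hnext.j_le
        exact ihb (j + 1) w (by omega) hnext
      · have hlt := hnew.i_lt
        exact iha (i + 1) (by omega) _ 0 w (Nat.le_refl _) hnew
      · exact finish_from_tail_w hseg5 others frames len A stored room ysz u ret f w htail

/-- From the join 1071AEH the function returns: segment 3, then the saving loops from `(0, 0)`. -/
theorem finish_from_join_w {Lay : Layout} {μ : Microarch} {u₀ : State}
    (hseg3 : vorbis_finish_frame.Seg3 Lay μ u₀) (hseg4 : vorbis_finish_frame.Seg4 Lay μ u₀)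
    (hseg5 : vorbis_finish_frame.Seg5 Lay μ u₀)
    (others : List Obj) (frames : List (Nat × FrameLayout)) (len : Nat) (A : Arena) (stored room : Int) (ysz : Nat → Nat)
    (u : State) (ret : Word) (f : Nat) (v : State)
    (hv : vorbis_finish_frame.AtPrevJoin Lay others frames len A stored room ysz u₀ u ret f v) :
    ReachVia Lay μ WayInv v
      (Returned (conv u₀) (vorbis_finish_frame.spec others frames len A stored room ysz) u ret) := by
  apply (hseg3 others frames len A stored room ysz u ret f v hv).trans
  intro w hw
  exact finish_from_save_w hseg4 hseg5 others frames len A stored room ysz u ret f _ 0 (Nat.le_refl _) _ 0 w (Nat.le_refl _) hw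

/-- From the head of the flattened mixing loop at `(i, j)` the function returns: outer induction on `a ≥ channels − i`, inner
induction on `b ≥ n − j`. The step `(i, j) → (i, j + 1)` decreases `b` because the new assertion says `j + 1 ≤ n`; the step
`(i, j) → (i + 1, 0)` decreases `a` because the new assertion says `i + 1 < channels`. -/
theorem finish_from_mix_w {Lay : Layout} {μ : Microarch} {u₀ : State}
    (hseg2 : vorbis_finish_frame.Seg2 Lay μ u₀) (hseg3 : vorbis_finish_frame.Seg3 Lay μ u₀)
    (hseg4 : vorbis_finish_frame.Seg4 Lay μ u₀) (hseg5 : vorbis_finish_frame.Seg5 Lay μ u₀)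
    (others : List Obj) (frames : List (Nat × FrameLayout)) (len : Nat) (A : Arena) (stored room : Int) (ysz : Nat → Nat)
    (u : State) (ret : Word) (f n wp : Nat) :
    ∀ (a i : Nat), (stb_vorbis.channels u.mem f).toNat - i ≤ a →
    ∀ (b j : Nat) (v : State), n - j ≤ b →
      vorbis_finish_frame.AtMix Lay others frames len A stored room ysz u₀ u ret f i j n wp v →
      ReachVia Lay μ WayInv v
        (Returned (conv u₀) (vorbis_finish_frame.spec others frames len A stored room ysz) u ret) := by
  intro a
  induction a with
  | zero =>
    intro i ha b j v _ hv
    have hlt := hv.i_lt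
    omega
  | succ a iha =>
    intro i ha b
    induction b with
    | zero =>
      intro j v hb hv
      apply (hseg2 others frames len A stored room ysz u ret f i j n wp v hv).trans
      intro w hw
      rcases hw with hnext | hnew | hjoin
      · have hj := hnext.j_le
        omega
      · have hlt := hnew.i_lt
        exact iha (i + 1) (by omega) _ 0 w (Nat.le_refl _) hnew
      · exact finish_from_join_w hseg3 hseg4 hseg5 others frames len A stored room ysz u ret f w hjoin
    | succ b ihb =>
      intro j v hb hv
      apply (hseg2 others frames len A stored room ysz u ret f i j n wp v hv).trans
      intro w hw
      rcases hw with hnext | hnew | hjoin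
      · have hj := hnext.j_le
        exact ihb (j + 1) w (by omega) hnext
      · have hlt := hnew.i_lt
        exact iha (i + 1) (by omega) _ 0 w (Nat.le_refl _) hnew
      · exact finish_from_join_w hseg3 hseg4 hseg5 others frames len A stored room ysz u ret f w hjoin

end Vorbis.Spec.Worked.vorbis_finish_frame_COMPOSITION

theorem Vorbis.Spec.Worked.vorbis_finish_frame_COMPOSITION_ok : Vorbis.Spec.vorbis_finish_frame_COMPOSITION.Statement := by
  intro Lay hLay μ hμ u₀ hseg1 hseg2 hseg3 hseg4 hseg5 others frames len A stored room ysz u ret he hpre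
  apply (hseg1 others frames len A stored room ysz u ret (u.reg .rdi).toNat he hpre rfl).trans
  intro v hv
  rcases hv with ⟨n, wp, hmix⟩ | hjoin | hret
  · exact Vorbis.Spec.Worked.vorbis_finish_frame_COMPOSITION.finish_from_mix_w hseg2 hseg3 hseg4 hseg5 others frames len A stored room ysz
      u ret _ n wp _ 0 (Nat.le_refl _) _ 0 v (Nat.le_refl _) hmix
  · exact Vorbis.Spec.Worked.vorbis_finish_frame_COMPOSITION.finish_from_join_w hseg3 hseg4 hseg5 others frames len A stored room ysz
      u ret _ v hjoin
  · exact ReachVia.done hret
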